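-- pv_equiv track=rewrite | github.com/mariafaa1/EP2 | funcoes.py | calcula_pontos_sequencia_alta
-- ===== SOURCE A (Python) =====
-- def calcula_pontos_sequencia_alta(dados_rolados):
--     dados = []
--     for dado in dados_rolados:
--         if dado not in dados:
--             dados.append(dado)
--     for i in range(len(dados)):
--         for j in range(0, len(dados)-i-1):
--             if dados[j] > dados[j+1]:
--                 dados[j], dados[j+1] = dados[j+1], dados[j]
--     for i in range(len(dados)):
--         contador = 1
--         atual = dados[i]
--         for j in range(i + 1, len(dados)):
--             if dados[j] == atual + 1:
--                 contador += 1
--                 atual = dados[j]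
--             if contador == 5:
--                 return 30
--     return 0
-- ===== SOURCE B (Python) =====
-- def calcula_pontos_sequencia_alta(dados_rolados):
--     valores = set(dados_rolados)
--     for v in valores:
--         if v + 1 in valores and v + 2 in valores and v + 3 in valores and v + 4 in valores:
--             return 30
--     return 0
-- ===== Notes on version B (the rewrite author's own statement) =====
-- stated objective: faster
-- what changed: Replaces A's manual dedup list, in-place bubble sort and nested ascending-run scan with a single hash set of the distinct values and direct membership tests for v+1..v+4.
import Mathlib
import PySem

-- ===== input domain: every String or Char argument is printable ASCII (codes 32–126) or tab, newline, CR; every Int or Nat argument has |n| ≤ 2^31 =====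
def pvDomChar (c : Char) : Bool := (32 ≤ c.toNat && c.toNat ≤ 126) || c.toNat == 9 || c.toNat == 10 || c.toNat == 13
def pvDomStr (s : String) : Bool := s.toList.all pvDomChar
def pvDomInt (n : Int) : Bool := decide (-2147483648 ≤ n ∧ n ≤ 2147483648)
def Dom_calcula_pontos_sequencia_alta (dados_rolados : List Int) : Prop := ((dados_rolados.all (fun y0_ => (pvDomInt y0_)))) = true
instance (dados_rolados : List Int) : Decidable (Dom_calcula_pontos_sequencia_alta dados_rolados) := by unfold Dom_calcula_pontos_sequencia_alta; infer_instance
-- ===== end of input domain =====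

-- B replaces A's dedup + bubble sort + nested ascending-run scan by one set of the distinct
-- values and direct membership tests for v+1..v+4 (objective: faster; return value only, A mutates nothing).

-- ===== PORT A =====
-- one compare-and-swap step `if dados[j] > dados[j+1]: dados[j], dados[j+1] = dados[j+1], dados[j]`;
-- j and j+1 are always in range when called (j < len-i-1 ≤ len-1), so getD/set are exact here
def pvSwapA (l : List Int) (j : Nat) : List Int :=
  let a := l.getD j 0
  let b := l.getD (j+1) 0
  if a > b then (l.set j b).set (j+1) a else l

-- inner loop `for j in range(0, len(dados)-i-1)`
def pvPassA (l : List Int) (m : Nat) : List Int := (List.range m).foldl pvSwapA l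

-- outer bubble-sort loop `for i in range(len(dados))`; the length of the list never changes,
-- so the live `len(dados)` equals the initial length n; `len-i-1` is never negative since i < n
def pvSortA (l : List Int) : List Int :=
  (List.range l.length).foldl (fun r i => pvPassA r (l.length - i - 1)) l

-- `for j in range(i+1, len(dados))` reading dados[j] = structural recursion over the suffix after i
def pvInnerA : List Int → Int → Int → Bool
  | [], _, _ => false
  | d :: rest, contador, atual =>
    let c := if d = atual + 1 then contador + 1 else contador
    let a := if d = atual + 1 then d else atual
    if c = 5 then true else pvInnerA rest c a

-- `for i in range(len(dados))` with `atual = dados[i]`, inner loop over the suffix after i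
def pvOuterA : List Int → Bool
  | [] => false
  | d :: rest => if pvInnerA rest 1 d then true else pvOuterA rest

def calcula_pontos_sequencia_alta (dados_rolados : List Int) : Int :=
  -- `dados = []; for dado in dados_rolados: if dado not in dados: dados.append(dado)`
  let dados := dados_rolados.foldl (fun acc dado => if acc.contains dado then acc else acc ++ [dado]) []
  let dados := pvSortA dados
  if pvOuterA dados then 30 else 0

-- ===== PORT B =====
def calcula_pontos_sequencia_alta_alt (dados_rolados : List Int) : Int :=
  let valores : PySem.Set Int := PySem.Set.ofList dados_rolados
  -- result is independent of the set's iteration order (30 on any hit, 0 otherwise)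
  if valores.any (fun v => PySem.Set.contains valores (v+1) && PySem.Set.contains valores (v+2) &&
      PySem.Set.contains valores (v+3) && PySem.Set.contains valores (v+4)) then 30 else 0

-- ===== PRECONDITION & SPEC =====
def Spec_calcula_pontos_sequencia_alta (dados_rolados : List Int) (out : Int) : Prop := out = calcula_pontos_sequencia_alta_alt dados_rolados
instance (dados_rolados : List Int) (out : Int) : Decidable (Spec_calcula_pontos_sequencia_alta dados_rolados out) := by unfold Spec_calcula_pontos_sequencia_alta; infer_instance

-- ===== CLAIM (what is proved, stated in full; the proofs are below) =====
def Claim_equal_calcula_pontos_sequencia_alta : Prop := ∀ (dados_rolados : List Int), Dom_calcula_pontos_sequencia_alta dados_rolados → Spec_calcula_pontos_sequencia_alta dados_rolados (calcula_pontos_sequencia_alta dados_rolados)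

-- ===== LEMMAS AND PROOFS =====

-- structural form of one (length-m) bubble pass
def spass : Nat → List Int → List Int
  | 0, l => l
  | _+1, [] => []
  | _+1, [a] => [a]
  | m+1, a :: b :: t => if b < a then b :: spass m (a :: t) else a :: spass m (b :: t)

theorem pvSwapA_zero (a b : Int) (t : List Int) :
    pvSwapA (a :: b :: t) 0 = if b < a then b :: a :: t else a :: b :: t := by
  simp [pvSwapA]

theorem pvSwapA_succ (x : Int) (t : List Int) (j : Nat) :
    pvSwapA (x :: t) (j+1) = x :: pvSwapA t j := by
  simp only [pvSwapA, List.getD_cons_succ, List.set_cons_succ]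
  split <;> rfl

theorem foldl_swapA_map_succ (js : List Nat) (x : Int) (t : List Int) :
    (js.map Nat.succ).foldl pvSwapA (x :: t) = x :: js.foldl pvSwapA t := by
  induction js generalizing t with
  | nil => rfl
  | cons j js ih => simp [List.foldl_cons, pvSwapA_succ, ih]

theorem pvPassA_eq_spass : ∀ (m : Nat) (l : List Int), m ≤ l.length - 1 → pvPassA l m = spass m l := by
  intro m
  induction m with
  | zero => intro l _; rfl
  | succ m ih =>
    intro l hm
    match l with
    | [] => simp at hm
    | [a] => simp at hm
    | a :: b :: t =>
      have : pvPassA (a :: b :: t) (m+1)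
          = ((List.range m).map Nat.succ).foldl pvSwapA (pvSwapA (a :: b :: t) 0) := by
        simp [pvPassA, List.range_succ_eq_map]
      rw [this, pvSwapA_zero]
      have hm' : ∀ c : Int, m ≤ (c :: t).length - 1 := by
        intro c; simp at hm ⊢; omega
      by_cases h : b < a
      · simp only [foldl_swapA_map_succ, spass, if_pos h]
        exact congrArg _ (ih _ (hm' a))
      · simp only [foldl_swapA_map_succ, spass, if_neg h]
        exact congrArg _ (ih _ (hm' b))

theorem spass_perm : ∀ (m : Nat) (l : List Int), (spass m l).Perm l := by
  intro m
  induction m with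
  | zero => intro l; exact List.Perm.refl l
  | succ m ih =>
    intro l
    match l with
    | [] => exact List.Perm.refl _
    | [a] => exact List.Perm.refl _
    | a :: b :: t =>
      simp only [spass]
      split
      · exact ((ih (a :: t)).cons b).trans (List.Perm.swap a b t)
      · exact (ih (b :: t)).cons a

theorem spass_length (m : Nat) (l : List Int) : (spass m l).length = l.length :=
  (spass_perm m l).length_eq

theorem spass_drop : ∀ (m : Nat) (l : List Int), m < l.length →
    (spass m l).drop (m+1) = l.drop (m+1) := by
  intro m
  induction m with
  | zero => intro l _; rfl
  | succ m ih =>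
    intro l hm
    match l with
    | [] => simp at hm
    | [a] => simp at hm
    | a :: b :: t =>
      have ht : ∀ c : Int, m < (c :: t).length := by intro c; simp at hm ⊢; omega
      simp only [spass]
      split
      · show (b :: spass m (a :: t)).drop (m+2) = (a :: b :: t).drop (m+2)
        simp only [List.drop_succ_cons, ih _ (ht a)]
      · show (a :: spass m (b :: t)).drop (m+2) = (a :: b :: t).drop (m+2)
        simp only [List.drop_succ_cons, ih _ (ht b)]

theorem spass_take_perm (m : Nat) (l : List Int) (hm : m < l.length) :
    ((spass m l).take (m+1)).Perm (l.take (m+1)) := by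
  have hp : ((spass m l).take (m+1) ++ (spass m l).drop (m+1)).Perm (l.take (m+1) ++ l.drop (m+1)) := by
    rw [List.take_append_drop, List.take_append_drop]
    exact spass_perm m l
  rw [spass_drop m l hm] at hp
  exact (List.perm_append_right_iff _).mp hp

theorem spass_max : ∀ (m : Nat) (l : List Int), m < l.length →
    ∀ x ∈ (spass m l).take (m+1), x ≤ (spass m l).getD m 0 := by
  intro m
  induction m with
  | zero =>
    intro l hl x hx
    match l with
    | [] => simp at hl
    | a :: t => simp [spass] at hx ⊢; omega
  | succ m ih =>
    intro l hl x hx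
    match l with
    | [] => simp at hl
    | [a] => simp at hl
    | a :: b :: t =>
      have ht : ∀ c : Int, m < (c :: t).length := by intro c; simp at hl ⊢; omega
      -- in both branches: spass (m+1) l = h1 :: spass m (c :: t) with h1 ≤ c
      have key : ∀ (h1 c : Int), h1 ≤ c → x ∈ (h1 :: spass m (c :: t)).take (m+2) →
          x ≤ (h1 :: spass m (c :: t)).getD (m+1) 0 := by
        intro h1 c hle hx
        have hM : (h1 :: spass m (c :: t)).getD (m+1) 0 = (spass m (c :: t)).getD m 0 := rfl
        rw [hM]
        rcases List.mem_cons.mp (by simpa using hx) with h | h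
        · subst h
          have hc : c ∈ (spass m (c :: t)).take (m+1) := by
            have : c ∈ (c :: t).take (m+1) := by simp
            exact ((spass_take_perm m (c :: t) (ht c)).mem_iff).mpr this
          exact le_trans hle (ih (c :: t) (ht c) c hc)
        · exact ih (c :: t) (ht c) x h
      simp only [spass] at hx ⊢
      split at hx
      · next h => rw [if_pos h] ; exact key b a (le_of_lt h) hx
      · next h => rw [if_neg h] ; exact key a b (by omega) hx

-- the bubble-sort outer-loop invariant
theorem pvSortA_invariant (d : List Int) : ∀ i ≤ d.length,
    letI r := (List.range i).foldl (fun r i => pvPassA r (d.length - i - 1)) d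
    r.Perm d ∧ (r.drop (d.length - i)).Pairwise (· ≤ ·) ∧
      ∀ x ∈ r.take (d.length - i), ∀ y ∈ r.drop (d.length - i), x ≤ y := by
  intro i
  induction i with
  | zero =>
    intro _
    refine ⟨List.Perm.refl d, ?_, ?_⟩
    · simp [List.drop_length]
    · intro x _ y hy; simp [List.drop_length] at hy
  | succ i ih =>
    intro hi
    have hi' : i ≤ d.length := by omega
    obtain ⟨hperm, hsorted, hdom⟩ := ih hi'
    set n := d.length with hn
    set r := (List.range i).foldl (fun r i => pvPassA r (n - i - 1)) d with hr
    have hlen : r.length = n := hperm.length_eq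
    have hstep : (List.range (i+1)).foldl (fun r i => pvPassA r (n - i - 1)) d
        = pvPassA r (n - i - 1) := by
      rw [List.range_succ, List.foldl_append]; rfl
    set m := n - i - 1 with hmdef
    have hm1 : m < r.length := by omega
    have hpass : pvPassA r m = spass m r := pvPassA_eq_spass m r (by omega)
    set r' := spass m r with hr'
    have hm1' : m < r'.length := by rw [spass_length]; omega
    have hsub : n - (i+1) = m := by omega
    have hperm' : r'.Perm d := (spass_perm m r).trans hperm
    have hdropeq : r'.drop (m+1) = r.drop (m+1) := spass_drop m r hm1
    have htake : (r'.take (m+1)).Perm (r.take (m+1)) := spass_take_perm m r hm1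
    have hM : ∀ x ∈ r'.take (m+1), x ≤ r'.getD m 0 := spass_max m r hm1
    have hmem : r'.getD m 0 ∈ r'.take (m+1) := by
      rw [List.getD_eq_getElem?_getD, List.getElem?_eq_getElem hm1']
      have : r'[m] ∈ r'.take (m+1) := by
        rw [List.mem_take_iff_getElem]
        exact ⟨m, by omega, rfl⟩
      simpa using this
    have hsuffix : m + 1 = n - i := by omega
    have hdrop' : r'.drop m = r'.getD m 0 :: r'.drop (m+1) := by
      rw [List.getD_eq_getElem?_getD, List.getElem?_eq_getElem hm1']
      exact List.drop_eq_getElem_cons hm1'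
    -- elements of r'.take (m+1) are elements of r.take (n-i)
    have htakemem : ∀ x ∈ r'.take (m+1), x ∈ r.take (n - i) := by
      intro x hx
      have := htake.mem_iff.mp hx
      rwa [hsuffix] at this
    rw [hstep, hpass]
    refine ⟨hperm', ?_, ?_⟩
    · rw [hsub, hdrop', hdropeq, hsuffix]
      refine List.pairwise_cons.mpr ⟨?_, hsorted⟩
      intro y hy
      exact hdom _ (htakemem _ hmem) y hy
    · intro x hx y hy
      rw [hsub] at hx hy
      have hx' : x ∈ r'.take (m+1) := by
        have he : r'.take m = (r'.take (m+1)).take m := by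
          rw [List.take_take]; congr 1; omega
        rw [he] at hx
        exact List.mem_of_mem_take hx
      rw [hdrop'] at hy
      rcases List.mem_cons.mp hy with h | h
      · subst h; exact hM x hx'
      · rw [hdropeq, hsuffix] at h
        exact hdom x (htakemem x hx') y h

-- the chain property both programs decide
def HasRun (xs : List Int) (v : Int) : Prop :=
  v ∈ xs ∧ v + 1 ∈ xs ∧ v + 2 ∈ xs ∧ v + 3 ∈ xs ∧ v + 4 ∈ xs

theorem pvInnerA_sound : ∀ (rest : List Int) (c atual : Int), c < 5 → pvInnerA rest c atual = true →
    ∀ k : Int, 1 ≤ k → k ≤ 5 - c → atual + k ∈ rest := by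
  intro rest
  induction rest with
  | nil => intro c atual _ h; simp [pvInnerA] at h
  | cons d rest ih =>
    intro c atual hc h k hk1 hk2
    by_cases hd : d = atual + 1
    · simp only [pvInnerA, if_pos hd] at h
      by_cases h5 : c + 1 = 5
      · have : k = 1 := by omega
        subst this; rw [hd.symm]; exact List.mem_cons_self
      · rw [if_neg h5] at h
        by_cases hk : k = 1
        · subst hk; rw [hd.symm]; exact List.mem_cons_self
        · have hmem : d + (k - 1) ∈ rest := ih (c+1) d (by omega) h (k-1) (by omega) (by omega)
          have : atual + k = d + (k - 1) := by rw [hd]; ring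
          rw [this]; exact List.mem_cons_of_mem _ hmem
    · simp only [pvInnerA, if_neg hd] at h
      rw [if_neg (by omega : ¬ c = 5)] at h
      exact List.mem_cons_of_mem _ (ih c atual hc h k hk1 hk2)

theorem pvOuterA_sound : ∀ l : List Int, pvOuterA l = true → ∃ v, HasRun l v := by
  intro l
  induction l with
  | nil => intro h; simp [pvOuterA] at h
  | cons d rest ih =>
    intro h
    by_cases hi : pvInnerA rest 1 d = true
    · refine ⟨d, List.mem_cons_self, ?_, ?_, ?_, ?_⟩ <;>
        exact List.mem_cons_of_mem _ (pvInnerA_sound rest 1 d (by omega) hi _ (by omega) (by omega))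
    · simp only [pvOuterA, if_neg hi] at h
      obtain ⟨v, h1, h2, h3, h4, h5⟩ := ih h
      exact ⟨v, List.mem_cons_of_mem _ h1, List.mem_cons_of_mem _ h2,
        List.mem_cons_of_mem _ h3, List.mem_cons_of_mem _ h4, List.mem_cons_of_mem _ h5⟩

theorem pvInnerA_complete : ∀ (rest : List Int) (c atual : Int), rest.Pairwise (· < ·) →
    1 ≤ c → c ≤ 4 → (∀ k : Int, 1 ≤ k → k ≤ 5 - c → atual + k ∈ rest) →
    pvInnerA rest c atual = true := by
  intro rest
  induction rest with
  | nil =>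
    intro c atual _ hc1 hc4 hmem
    exact absurd (hmem 1 (by omega) (by omega)) (List.not_mem_nil)
  | cons e r ih =>
    intro c atual hpw hc1 hc4 hmem
    obtain ⟨hlt, hpw'⟩ := List.pairwise_cons.mp hpw
    by_cases he : e = atual + 1
    · simp only [pvInnerA, if_pos he]
      by_cases h5 : c + 1 = 5
      · rw [if_pos h5]
      · rw [if_neg h5]
        refine ih (c+1) e hpw' (by omega) (by omega) ?_
        intro k hk1 hk2
        have hm : atual + (k + 1) ∈ e :: r := hmem (k+1) (by omega) (by omega)
        have hne : atual + (k + 1) ≠ e := by rw [he]; omega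
        have : e + k = atual + (k + 1) := by rw [he]; ring
        rw [this]
        exact (List.mem_cons.mp hm).resolve_left hne
    · -- e < atual + 1, so e is none of atual+1..atual+(5-c); the scan skips e
      have h1 : atual + 1 ∈ e :: r := hmem 1 (by omega) (by omega)
      have h1r : atual + 1 ∈ r := (List.mem_cons.mp h1).resolve_left (fun h => he h.symm)
      have helt : e < atual + 1 := hlt _ h1r
      simp only [pvInnerA, if_neg he]
      rw [if_neg (by omega : ¬ c = 5)]
      refine ih c atual hpw' hc1 hc4 ?_
      intro k hk1 hk2
      have hm : atual + k ∈ e :: r := hmem k hk1 hk2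
      have hne : atual + k ≠ e := by omega
      exact (List.mem_cons.mp hm).resolve_left hne

theorem pvOuterA_complete : ∀ l : List Int, l.Pairwise (· < ·) →
    ∀ v : Int, HasRun l v → pvOuterA l = true := by
  intro l
  induction l with
  | nil => intro _ v h; exact absurd h.1 (List.not_mem_nil)
  | cons d rest ih =>
    intro hpw v ⟨h0, h1, h2, h3, h4⟩
    obtain ⟨hlt, hpw'⟩ := List.pairwise_cons.mp hpw
    by_cases hi : pvInnerA rest 1 d = true
    · simp [pvOuterA, hi]
    · simp only [pvOuterA, if_neg hi]
      -- v ≠ d, else the inner scan from d would succeed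
      have hvd : v ≠ d := by
        intro hvd; subst hvd
        refine hi (pvInnerA_complete rest 1 v hpw' (by omega) (by omega) ?_)
        intro k hk1 hk2
        have hm : v + k ∈ v :: rest := by
          interval_cases k <;> assumption
        exact (List.mem_cons.mp hm).resolve_left (by omega)
      have h0r : v ∈ rest := (List.mem_cons.mp h0).resolve_left hvd
      have hdv : d < v := hlt _ h0r
      refine ih hpw' v ⟨h0r, ?_, ?_, ?_, ?_⟩ <;>
        · first
          | exact (List.mem_cons.mp h1).resolve_left (by omega)
          | exact (List.mem_cons.mp h2).resolve_left (by omega)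
          | exact (List.mem_cons.mp h3).resolve_left (by omega)
          | exact (List.mem_cons.mp h4).resolve_left (by omega)

-- A's hand-rolled dedup loop is exactly PySem.Set.ofList
theorem dedupA_eq_ofList (xs : List Int) :
    xs.foldl (fun acc dado => if acc.contains dado then acc else acc ++ [dado]) [] =
      PySem.Set.ofList xs := rfl

-- the sorted deduplicated list: a nodup, ≤-sorted permutation of set(xs)
theorem pvSortA_spec (d : List Int) :
    (pvSortA d).Perm d ∧ (pvSortA d).Pairwise (· ≤ ·) := by
  obtain ⟨hperm, hsorted, _⟩ := pvSortA_invariant d d.length le_rfl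
  rw [Nat.sub_self] at hsorted
  exact ⟨hperm, by simpa using hsorted⟩

theorem pvSortA_char (xs : List Int) :
    pvOuterA (pvSortA (PySem.Set.ofList xs)) = true ↔ ∃ v, HasRun xs v := by
  obtain ⟨hperm, hle⟩ := pvSortA_spec (PySem.Set.ofList xs)
  have hnd : (pvSortA (PySem.Set.ofList xs)).Nodup :=
    (hperm.nodup_iff).mpr (PySem.Set.nodup_ofList xs)
  have hlt : (pvSortA (PySem.Set.ofList xs)).Pairwise (· < ·) :=
    (hle.and hnd).imp (fun h => lt_of_le_of_ne h.1 h.2)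
  have hmem : ∀ x : Int, x ∈ pvSortA (PySem.Set.ofList xs) ↔ x ∈ xs := by
    intro x; rw [hperm.mem_iff, PySem.Set.mem_ofList]
  constructor
  · intro h
    obtain ⟨v, h0, h1, h2, h3, h4⟩ := pvOuterA_sound _ h
    exact ⟨v, (hmem v).mp h0, (hmem _).mp h1, (hmem _).mp h2, (hmem _).mp h3, (hmem _).mp h4⟩
  · rintro ⟨v, h0, h1, h2, h3, h4⟩
    exact pvOuterA_complete _ hlt v ⟨(hmem v).mpr h0, (hmem _).mpr h1, (hmem _).mpr h2,
      (hmem _).mpr h3, (hmem _).mpr h4⟩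

theorem alt_char (xs : List Int) :
    ((PySem.Set.ofList xs).any (fun v => PySem.Set.contains (PySem.Set.ofList xs) (v+1) &&
      PySem.Set.contains (PySem.Set.ofList xs) (v+2) && PySem.Set.contains (PySem.Set.ofList xs) (v+3) &&
      PySem.Set.contains (PySem.Set.ofList xs) (v+4))) = true ↔ ∃ v, HasRun xs v := by
  simp only [List.any_eq_true, PySem.Set.contains, Bool.and_eq_true, List.contains_iff_mem,
    PySem.Set.mem_ofList, HasRun]
  constructor
  · rintro ⟨v, h0, ⟨⟨h1, h2⟩, h3⟩, h4⟩; exact ⟨v, h0, h1, h2, h3, h4⟩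
  · rintro ⟨v, h0, h1, h2, h3, h4⟩; exact ⟨v, h0, ⟨⟨h1, h2⟩, h3⟩, h4⟩

-- ===== VERDICT (by name: the statement is the Claim_ definition above) =====
theorem calcula_pontos_sequencia_alta_spec : Claim_equal_calcula_pontos_sequencia_alta := by
  intro xs _
  show calcula_pontos_sequencia_alta xs = calcula_pontos_sequencia_alta_alt xs
  unfold calcula_pontos_sequencia_alta calcula_pontos_sequencia_alta_alt
  rw [dedupA_eq_ofList]
  by_cases h : ∃ v, HasRun xs v
  · rw [if_pos ((pvSortA_char xs).mpr h), if_pos ((alt_char xs).mpr h)]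
  · rw [if_neg (fun hb => h ((pvSortA_char xs).mp hb)),
       if_neg (fun hb => h ((alt_char xs).mp hb))]
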